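-- pv_equiv track=rewrite | github.com/MatrixRosul/rating_app | backend/app/services/bracket_generator/group_stage.py | _distribute_into_groups
-- ===== SOURCE A (Python) =====
-- from typing import List, Dict, Any, Tuple
--
-- def _distribute_into_groups(participant_ids: List[int], num_groups: int) -> List[List[int]]:
--     """
--     Distribute players into groups using snake seeding
--
--     Example with 8 players, 4 groups:
--     Group A: [1, 8]
--     Group B: [2, 7]
--     Group C: [3, 6]
--     Group D: [4, 5]
--     """
--     groups = [[] for _ in range(num_groups)]
--
--     for idx, player_id in enumerate(participant_ids):
--         # Snake pattern: 0,1,2,3,3,2,1,0,0,1,2,3...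
--         round_num = idx // num_groups
--         pos_in_round = idx % num_groups
--
--         if round_num % 2 == 0:
--             # Forward: 0,1,2,3
--             group_idx = pos_in_round
--         else:
--             # Backward: 3,2,1,0
--             group_idx = num_groups - 1 - pos_in_round
--
--         groups[group_idx].append(player_id)
--
--     return groups
-- ===== SOURCE B (Python) =====
-- def _distribute_into_groups(participant_ids, num_groups):
--     """Snake seeding by whole rounds: peel off one chunk of num_groups players
--     per round and zip it with the group order (forward on even rounds,
--     backward on odd rounds)."""
--     groups = [[] for _ in range(num_groups)]
--     rest = participant_ids
--     rnd = 0
--     while rest: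
--         chunk, rest = rest[:num_groups], rest[num_groups:]
--         order = range(num_groups) if rnd % 2 == 0 else reversed(range(num_groups))
--         for g, p in zip(order, chunk):
--             groups[g].append(p)
--         rnd += 1
--     return groups
-- ===== Notes on version B (the rewrite author's own statement) =====
-- stated objective: alternative
-- what changed: B replaces A's per-element index arithmetic (idx // num_groups, idx % num_groups, parity branch per element) with a round-by-round traversal: it slices the participants into chunks of num_groups and zips each chunk with the forward or reversed group order depending on round parity.
-- outside the precondition, e.g. on _distribute_into_groups([1], 0): A raises ZeroDivisionError, B does not finish within the time limit; on _distribute_into_groups([1, 2], -1): A raises IndexError, B does not finish within the time limit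
import Mathlib
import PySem

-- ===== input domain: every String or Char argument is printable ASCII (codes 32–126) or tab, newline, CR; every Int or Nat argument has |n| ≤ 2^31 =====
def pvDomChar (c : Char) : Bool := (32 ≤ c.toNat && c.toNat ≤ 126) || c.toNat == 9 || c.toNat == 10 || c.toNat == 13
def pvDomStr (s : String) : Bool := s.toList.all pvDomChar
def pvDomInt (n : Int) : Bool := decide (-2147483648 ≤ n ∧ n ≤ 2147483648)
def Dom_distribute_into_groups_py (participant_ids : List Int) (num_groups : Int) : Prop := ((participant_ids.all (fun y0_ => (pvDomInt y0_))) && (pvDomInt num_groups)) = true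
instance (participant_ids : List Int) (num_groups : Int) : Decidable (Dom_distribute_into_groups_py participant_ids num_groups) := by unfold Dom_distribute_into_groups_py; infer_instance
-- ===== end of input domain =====

-- B replaces A's per-element index arithmetic with a round-by-round chunk traversal
-- (zip each chunk of num_groups players with the forward or reversed group order); alternative decomposition, same cost.

-- ===== PORT A =====
-- the enumerate loop of A: rest of the list, current idx, current groups
def pvALoop (ng : Int) : List Int → Int → List (List Int) → List (List Int)
  | [], _, groups => groups
  | p :: rest, idx, groups =>
    let round_num := PySem.Int.floordiv idx ng
    let pos_in_round := PySem.Int.mod idx ng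
    let group_idx := if PySem.Int.mod round_num 2 = 0 then pos_in_round else ng - 1 - pos_in_round
    -- groups[group_idx].append(player_id); inside Pre_ group_idx is in range, so toNat is exact
    pvALoop ng rest (idx + 1) (groups.modify group_idx.toNat (· ++ [p]))

def distribute_into_groups_py (participant_ids : List Int) (num_groups : Int) : List (List Int) :=
  let groups := (List.range num_groups.toNat).map (fun _ => ([] : List Int))
  pvALoop num_groups participant_ids 0 groups

-- ===== PORT B =====
-- for g, p in zip(order, chunk): groups[g].append(p)
def pvBChunk (groups : List (List Int)) (order : List Nat) (chunk : List Int) : List (List Int) :=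
  (order.zip chunk).foldl (fun gs gp => gs.modify gp.1 (· ++ [gp.2])) groups

-- the while loop of B; n + 1 = num_groups (the match on toNat in the port only
-- expresses totality: Pre_ guarantees num_groups > 0 whenever participants exist)
def pvBLoop (n : Nat) : List Int → Nat → List (List Int) → List (List Int)
  | [], _, groups => groups
  | x :: xs, rnd, groups =>
    let chunk := x :: xs.take n
    let order := if rnd % 2 = 0 then List.range (n+1) else (List.range (n+1)).reverse
    pvBLoop n (xs.drop n) (rnd + 1) (pvBChunk groups order chunk)
termination_by l => l.length
decreasing_by simp [List.length_drop]

def distribute_into_groups_py_alt (participant_ids : List Int) (num_groups : Int) : List (List Int) :=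
  let groups := (List.range num_groups.toNat).map (fun _ => ([] : List Int))
  match num_groups.toNat with
  | 0 => groups
  | n + 1 => pvBLoop n participant_ids 0 groups

-- ===== PRECONDITION & SPEC =====
-- Pre_ excludes num_groups ≤ 0 with a nonempty participant list: there A raises
-- (ZeroDivisionError for num_groups = 0, IndexError on the empty groups list otherwise).
def Pre_distribute_into_groups_py (participant_ids : List Int) (num_groups : Int) : Prop :=
  0 < num_groups ∨ participant_ids = []
instance (participant_ids : List Int) (num_groups : Int) : Decidable (Pre_distribute_into_groups_py participant_ids num_groups) := by unfold Pre_distribute_into_groups_py; infer_instance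

def pvWitness_distribute_into_groups_py : List Int × Int := ([1, 2, 3, 4, 5, 6, 7, 8], 4)

def Spec_distribute_into_groups_py (participant_ids : List Int) (num_groups : Int) (out : List (List Int)) : Prop := out = distribute_into_groups_py_alt participant_ids num_groups
instance (participant_ids : List Int) (num_groups : Int) (out : List (List Int)) : Decidable (Spec_distribute_into_groups_py participant_ids num_groups out) := by unfold Spec_distribute_into_groups_py; infer_instance

-- ===== CLAIM (what is proved, stated in full; the proofs are below) =====
def Claim_equal_distribute_into_groups_py : Prop := ∀ (participant_ids : List Int) (num_groups : Int), Dom_distribute_into_groups_py participant_ids num_groups → Pre_distribute_into_groups_py participant_ids num_groups → Spec_distribute_into_groups_py participant_ids num_groups (distribute_into_groups_py participant_ids num_groups)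

-- ===== LEMMAS AND PROOFS =====

-- A's per-element step on a finite chunk (proof-only restatement of pvALoop's body)
def pvAChunk (ng : Int) : List Int → Int → List (List Int) → List (List Int)
  | [], _, groups => groups
  | p :: rest, idx, groups =>
    let round_num := PySem.Int.floordiv idx ng
    let pos_in_round := PySem.Int.mod idx ng
    let group_idx := if PySem.Int.mod round_num 2 = 0 then pos_in_round else ng - 1 - pos_in_round
    pvAChunk ng rest (idx + 1) (groups.modify group_idx.toNat (· ++ [p]))

lemma pvALoop_append (ng : Int) (c : List Int) (rest : List Int) (idx : Int)
    (groups : List (List Int)) :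
    pvALoop ng (c ++ rest) idx groups
      = pvALoop ng rest (idx + c.length) (pvAChunk ng c idx groups) := by
  induction c generalizing idx groups with
  | nil => simp [pvAChunk]
  | cons p c ih =>
    simp only [List.cons_append, pvALoop, pvAChunk, ih, List.length_cons]
    congr 1
    push_cast
    ring

lemma pvAChunk_eq_pvBChunk (n rnd j : Nat) (c : List Int) (groups : List (List Int))
    (h : j + c.length ≤ n + 1) :
    pvAChunk ((n + 1 : Nat) : Int) c ((rnd * (n + 1) + j : Nat) : Int) groups
      = pvBChunk groups
          ((if rnd % 2 = 0 then List.range (n+1) else (List.range (n+1)).reverse).drop j) c := by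
  induction c generalizing j groups with
  | nil => simp [pvAChunk, pvBChunk]
  | cons p c ih =>
    have hj : j < n + 1 := by rw [List.length_cons] at h; omega
    have hfd : PySem.Int.floordiv ((rnd * (n + 1) + j : Nat) : Int) ((n + 1 : Nat) : Int)
        = ((rnd : Nat) : Int) := by
      rw [PySem.Int.floordiv_natCast]
      congr 1
      rw [Nat.add_comm, Nat.add_mul_div_right _ _ (by omega : 0 < n + 1), Nat.div_eq_of_lt hj]
      omega
    have hmd : PySem.Int.mod ((rnd * (n + 1) + j : Nat) : Int) ((n + 1 : Nat) : Int)
        = ((j : Nat) : Int) := by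
      rw [PySem.Int.mod_natCast]
      congr 1
      rw [Nat.add_comm, Nat.add_mul_mod_self_right, Nat.mod_eq_of_lt hj]
    have hm2 : PySem.Int.mod ((rnd : Nat) : Int) 2 = ((rnd % 2 : Nat) : Int) := by
      exact_mod_cast PySem.Int.mod_natCast rnd 2
    have hgi : (if PySem.Int.mod (PySem.Int.floordiv ((rnd * (n + 1) + j : Nat) : Int) ((n + 1 : Nat) : Int)) 2 = 0
          then PySem.Int.mod ((rnd * (n + 1) + j : Nat) : Int) ((n + 1 : Nat) : Int)
          else ((n + 1 : Nat) : Int) - 1 - PySem.Int.mod ((rnd * (n + 1) + j : Nat) : Int) ((n + 1 : Nat) : Int)).toNat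
        = (if rnd % 2 = 0 then j else n - j) := by
      rw [hfd, hmd, hm2]
      by_cases hp : rnd % 2 = 0
      · simp [hp]
      · have hz : ¬ ((rnd % 2 : Nat) : Int) = 0 := fun hc => hp (by exact_mod_cast hc)
        rw [if_neg hz, if_neg hp]
        omega
    have hord : (if rnd % 2 = 0 then List.range (n+1) else (List.range (n+1)).reverse).drop j
        = (if rnd % 2 = 0 then j else n - j)
            :: (if rnd % 2 = 0 then List.range (n+1) else (List.range (n+1)).reverse).drop (j+1) := by
      by_cases hp : rnd % 2 = 0 <;> simp only [hp, if_true, if_false]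
      · rw [List.drop_eq_getElem_cons (by simpa using hj)]
        simp
      · rw [List.drop_eq_getElem_cons (by simpa using hj)]
        simp [List.getElem_reverse]
    simp only [pvAChunk]
    rw [hgi]
    have hidx : ((rnd * (n + 1) + j : Nat) : Int) + 1 = ((rnd * (n + 1) + (j + 1) : Nat) : Int) := by
      push_cast; ring
    rw [hidx, ih (j + 1) _ (by simp at h ⊢; omega), hord]
    simp [pvBChunk]

lemma pvALoop_eq_pvBLoop (n : Nat) :
    ∀ (k : Nat) (l : List Int) (rnd : Nat) (groups : List (List Int)), l.length ≤ k →
    pvALoop ((n + 1 : Nat) : Int) l ((rnd * (n + 1) : Nat) : Int) groups = pvBLoop n l rnd groups := by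
  intro k
  induction k with
  | zero =>
    intro l rnd groups hl
    have : l = [] := List.eq_nil_of_length_eq_zero (by omega)
    subst this; simp [pvALoop, pvBLoop]
  | succ k ih =>
    intro l rnd groups hl
    match l with
    | [] => simp [pvALoop, pvBLoop]
    | x :: xs =>
      have hsplit : x :: xs = (x :: xs.take n) ++ xs.drop n := by
        simp [List.take_append_drop]
      have hB : pvBLoop n (x :: xs) rnd groups
          = pvBLoop n (xs.drop n) (rnd + 1)
              (pvBChunk groups (if rnd % 2 = 0 then List.range (n+1) else (List.range (n+1)).reverse) (x :: xs.take n)) := by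
        simp [pvBLoop]
      have hchunk : pvAChunk ((n + 1 : Nat) : Int) (x :: xs.take n) ((rnd * (n + 1) : Nat) : Int) groups
          = pvBChunk groups (if rnd % 2 = 0 then List.range (n+1) else (List.range (n+1)).reverse) (x :: xs.take n) := by
        have := pvAChunk_eq_pvBChunk n rnd 0 (x :: xs.take n) groups
          (by simp [List.length_take])
        simpa using this
      conv_lhs => rw [hsplit]
      rw [pvALoop_append, hchunk, hB]
      rcases hrest : xs.drop n with _ | ⟨y, ys⟩
      · simp [pvALoop, pvBLoop]
      · have hlen : n < xs.length := by
          by_contra hc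
          have hnil : xs.drop n = [] := List.drop_eq_nil_of_le (by omega)
          rw [hnil] at hrest; exact absurd hrest (by simp)
        have hclen : (x :: xs.take n).length = n + 1 := by
          simp [List.length_take]; omega
        have hidx : ((rnd * (n + 1) : Nat) : Int) + ((x :: xs.take n).length : Int)
            = (((rnd + 1) * (n + 1) : Nat) : Int) := by
          rw [hclen]; push_cast; ring
        rw [hidx, ← hrest]
        exact ih (xs.drop n) (rnd + 1) _ (by simp [List.length_drop] at hl ⊢; omega)

-- ===== VERDICT (by name: the statement is the Claim_ definition above) =====
theorem distribute_into_groups_py_spec : Claim_equal_distribute_into_groups_py := by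
  intro pids ng _hdom hpre
  unfold Spec_distribute_into_groups_py distribute_into_groups_py distribute_into_groups_py_alt
  rcases hn : ng.toNat with _ | n
  · have hle : ng ≤ 0 := by omega
    have hnil : pids = [] := by
      rcases hpre with h | h
      · omega
      · exact h
    subst hnil
    simp [pvALoop]
  · have hng : ng = ((n + 1 : Nat) : Int) := by omega
    rw [hng]
    have := pvALoop_eq_pvBLoop n pids.length pids 0
      ((List.range (n+1)).map (fun _ => ([] : List Int))) (le_refl _)
    simpa using this
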